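-- pv_equiv track=rewrite | github.com/Andvri/PIC-PROJ-CRITEO | scripts/build-categories.py | generate_categories
-- ===== SOURCE A (Python) =====
-- def generate_categories(data, level):
--     categories = []
--     # Remove first line
--     data.pop(0)
--     for line in data:
--         categories_line = line.split('>')
--         i = 0
--         for category in categories_line:
--             if i < level and not category.strip()  in categories:
--                 categories.append(category.strip())
--             i+=1
--     return categories
-- ===== SOURCE B (Python) =====
-- def generate_categories(data, level):
--     data.pop(0)
--     n = max(level, 0)
--     result = []
--     for line in reversed(data):
--         head = []
--         for c in line.split('>')[:n]:
--             s = c.strip()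
--             if s not in head:
--                 head.append(s)
--         result = head + [c for c in result if c not in head]
--     return result
-- ===== Notes on version B (the rewrite author's own statement) =====
-- stated objective: alternative
-- what changed: Instead of threading one global seen-list through a forward scan, B walks the lines back-to-front: each line is deduplicated locally and prepended to the result so far, filtering the old result against the new line's categories.
import Mathlib
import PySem

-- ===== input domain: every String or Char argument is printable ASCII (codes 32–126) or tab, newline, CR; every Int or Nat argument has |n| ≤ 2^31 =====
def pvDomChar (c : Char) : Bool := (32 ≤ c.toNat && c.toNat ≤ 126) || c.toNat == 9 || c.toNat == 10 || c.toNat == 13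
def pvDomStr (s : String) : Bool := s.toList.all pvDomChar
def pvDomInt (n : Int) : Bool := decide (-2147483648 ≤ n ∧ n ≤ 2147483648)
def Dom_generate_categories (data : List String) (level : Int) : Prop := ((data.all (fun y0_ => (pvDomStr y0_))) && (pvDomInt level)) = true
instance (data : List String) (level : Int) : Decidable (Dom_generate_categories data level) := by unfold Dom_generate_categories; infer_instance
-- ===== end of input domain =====

-- B walks the lines back-to-front, deduplicating each line locally and filtering the result so far
-- against that line's categories (alternative decomposition; return-value equivalence only: both
-- Pythons pop data[0] in place).

-- s.split('>') for the literal non-empty separator '>' (split? is some here)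
def pySplitGt (s : String) : List String := (PySem.Str.split? s ">").getD []

-- ===== PORT A =====
def generate_categories (data : List String) (level : Int) : List String :=
  match data with
  | [] => []   -- data.pop(0) raises IndexError here; excluded by Pre_
  | _ :: rest =>
    rest.foldl (fun categories line =>
      ((pySplitGt line).foldl
          (fun (st : List String × Int) category =>
            (if st.2 < level ∧ ¬ (PySem.Str.strip category) ∈ st.1
             then st.1 ++ [PySem.Str.strip category] else st.1,
             st.2 + 1))
          (categories, 0)).1) []

-- ===== PORT B =====
-- the stripped first max(level,0) fields of one line
def gcFields (level : Int) (line : String) : List String :=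
  (PySem.List.slice (pySplitGt line) none (some (max level 0))).map PySem.Str.strip

-- one step of B's loop: dedup the line locally, prepend, filter the previous result
def gcStep (level : Int) (line : String) (res : List String) : List String :=
  let head := (gcFields level line).foldl (fun h s => if s ∈ h then h else h ++ [s]) []
  head ++ res.filter (fun c => !(head.contains c))

def generate_categories_alt (data : List String) (level : Int) : List String :=
  match data with
  | [] => []   -- data.pop(0) raises IndexError here; excluded by Pre_
  | _ :: rest => rest.reverse.foldl (fun res line => gcStep level line res) []

-- ===== PRECONDITION & SPEC =====
-- Pre_ excludes only the empty list, on which data.pop(0) raises IndexError in both A and B.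
def Pre_generate_categories (data : List String) (level : Int) : Prop := data ≠ []
instance (data : List String) (level : Int) : Decidable (Pre_generate_categories data level) := by unfold Pre_generate_categories; infer_instance
def pvWitness_generate_categories : List String × Int := (["header", "A > B > C", "A>D"], 2)
def Spec_generate_categories (data : List String) (level : Int) (out : List String) : Prop := out = generate_categories_alt data level
instance (data : List String) (level : Int) (out : List String) : Decidable (Spec_generate_categories data level out) := by unfold Spec_generate_categories; infer_instance

-- ===== CLAIM (what is proved, stated in full; the proofs are below) =====
def Claim_equal_generate_categories : Prop := ∀ (data : List String) (level : Int), Dom_generate_categories data level → Pre_generate_categories data level → Spec_generate_categories data level (generate_categories data level)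

-- ===== LEMMAS AND PROOFS =====

-- the common dedup step both proofs are reduced to
def sadd (h : List String) (s : String) : List String := if s ∈ h then h else h ++ [s]

-- A's inner loop over one line, started at counter j, strips and sadd-folds the first
-- (level.toNat - j) fields.
theorem inner_fold_eq (level : Int) (cs : List String) (acc : List String) (j : Nat) :
    (cs.foldl
        (fun (st : List String × Int) category =>
          (if st.2 < level ∧ ¬ (PySem.Str.strip category) ∈ st.1
           then st.1 ++ [PySem.Str.strip category] else st.1,
           st.2 + 1))
        (acc, (j : Int))).1
      = ((cs.take (level.toNat - j)).map PySem.Str.strip).foldl sadd acc := by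
  induction cs generalizing acc j with
  | nil => simp
  | cons c cs ih =>
    by_cases h : (j : Int) < level
    · have hj : j < level.toNat := by omega
      have htake : level.toNat - j = (level.toNat - (j + 1)) + 1 := by omega
      simp only [List.foldl_cons, htake, List.take_succ_cons, List.map_cons]
      rw [show ((j : Int) + 1) = ((j + 1 : Nat) : Int) by push_cast; ring]
      rw [ih]
      congr 1
      simp only [sadd]
      by_cases hm : PySem.Str.strip c ∈ acc <;> simp [h, hm]
    · have htake : level.toNat - j = 0 := by omega
      have htake' : level.toNat - (j + 1) = 0 := by omega
      simp only [List.foldl_cons, htake, List.take_zero, List.map_nil, List.foldl_nil]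
      rw [show ((j : Int) + 1) = ((j + 1 : Nat) : Int) by push_cast; ring]
      rw [ih, htake']
      simp [h]

theorem slice_take (level : Int) (cs : List String) :
    PySem.List.slice cs none (some (max level 0)) = cs.take level.toNat := by
  rw [PySem.List.slice_to cs (b := max level 0) (by omega)]
  congr 1
  omega

-- folding sadd from an arbitrary accumulator = the from-[] fold, filtered against the accumulator
theorem sadd_extend (ys : List String) (acc : List String) :
    ys.foldl sadd acc = acc ++ (ys.foldl sadd []).filter (fun z => !(acc.contains z)) := by
  induction ys generalizing acc with
  | nil => simp
  | cons y ys ih =>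
    simp only [List.foldl_cons]
    rw [ih (sadd acc y), ih (sadd [] y)]
    rw [show sadd [] y = [y] from by simp [sadd]]
    by_cases hy : y ∈ acc
    · rw [show sadd acc y = acc from by simp [sadd, hy]]
      congr 1
      simp only [List.filter_append, List.filter_cons, List.filter_filter, List.contains_eq_mem,
        hy, decide_true, Bool.not_true, Bool.false_eq_true, if_false, List.filter_nil,
        List.nil_append]
      apply List.filter_congr
      intro z _
      by_cases hzy : z = y
      · subst hzy; simp [hy]
      · simp [hzy]
    · rw [show sadd acc y = acc ++ [y] from by simp [sadd, hy]]
      simp only [List.filter_append, List.filter_cons, List.filter_filter, List.contains_eq_mem,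
        hy, decide_false, Bool.not_false, if_true, List.filter_nil, List.nil_append,
        List.append_assoc, List.singleton_append]
      congr 2
      apply List.filter_congr
      intro z _
      by_cases hzy : z = y
      · subst hzy; simp [hy]
      · simp [hzy, List.mem_append]

-- B's reverse loop computes the sadd fold over the concatenated fields
theorem gcGo_eq (level : Int) (lines : List String) :
    lines.reverse.foldl (fun res line => gcStep level line res) []
      = (lines.flatMap (gcFields level)).foldl sadd [] := by
  rw [List.foldl_reverse]
  induction lines with
  | nil => rfl
  | cons l ls ih =>
    have hdef : List.foldr (fun line res => gcStep level line res) [] (l :: ls)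
        = ((gcFields level l).foldl sadd [])
          ++ ((List.foldr (fun line res => gcStep level line res) [] ls).filter
              (fun c => !(((gcFields level l).foldl sadd []).contains c))) := rfl
    rw [hdef, ih, List.flatMap_cons, List.foldl_append,
      sadd_extend (ls.flatMap (gcFields level)) ((gcFields level l).foldl sadd [])]

-- A's outer fold computes the same sadd fold over the same concatenated fields
theorem outer_fold_eq (level : Int) (rest : List String) :
    rest.foldl (fun categories line =>
      ((pySplitGt line).foldl
          (fun (st : List String × Int) category =>
            (if st.2 < level ∧ ¬ (PySem.Str.strip category) ∈ st.1
             then st.1 ++ [PySem.Str.strip category] else st.1,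
             st.2 + 1))
          (categories, 0)).1) []
    = (rest.flatMap (gcFields level)).foldl sadd [] := by
  rw [List.foldl_flatMap]
  apply PySem.List.foldl_congr_mem
  intro acc line _
  have := inner_fold_eq level (pySplitGt line) acc 0
  simp only [Nat.cast_zero, Nat.sub_zero] at this
  rw [this, gcFields, slice_take]

theorem generate_categories_spec : Claim_equal_generate_categories := by
  intro data level _ hpre
  unfold Spec_generate_categories
  cases data with
  | nil => exact absurd rfl hpre
  | cons h rest =>
    simp only [generate_categories, generate_categories_alt]
    rw [outer_fold_eq, gcGo_eq]

-- ===== VERDICT (by name: the statement is the Claim_ definition above) =====
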